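-- pv_equiv track=rewrite | github.com/stocktons/advent-of-code-2023 | day-06/parts_1_and_2.py | find_lower_bound
-- ===== SOURCE A (Python) =====
-- def calculate_distance(total_time, button_time):
--     """
--     >>> calculate_distance(7, 0)
--     0
--     >>> calculate_distance(7, 3)
--     12
--     """
--
--     travel_time = total_time - button_time
--     speed_multiplier = button_time
--
--     race_distance = travel_time * speed_multiplier
--
--     return race_distance
--
-- def find_lower_bound(record_dist, time):
--     """
--     Takes in a record distance and a time representing the length of the race.
--     Finds the least number of milliseconds a button has to be pressed to
--     beat the record.
--
--     This approach with my puzzle input (vs. just a plain loop that checks every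
--     possible millisecond in order) reduces the number of operations
--     from 38,947,970 to 25.
--     """
--
--     leftIdx = 0  # shortest button press
--     rightIdx = time  # longest button press
--
--     # for curiosity to see how many operations it takes to find the solution:
--     # counter = 0
--
--     while (leftIdx <= rightIdx):
--         # counter += 1
--         # find the middle value
--         middleIdx = (leftIdx + rightIdx) // 2  # // is floor division operator
--         distance = calculate_distance(time, middleIdx)
--
--         if (distance < record_dist):
--             # distance is too small, look at the right half
--             leftIdx = middleIdx + 1
--         elif (distance > record_dist):
--             # distance is too large, look at the left half
--             rightIdx = middleIdx - 1
--         else: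
--             # we found our exact value, so grab next one up
--             return middleIdx + 1  # , counter
--
--     # didn't find an exact match, so figure out which
--     if distance < record_dist:
--         return middleIdx + 1  # , counter
--
--     return middleIdx  # , counter
-- ===== SOURCE B (Python) =====
-- def _isqrt(n):
--     """Floor square root of n >= 0 by Newton's method."""
--     if n < 2:
--         return n
--     x = n
--     y = (x + 1) // 2
--     while y < x:
--         x = y
--         y = (x + n // x) // 2
--     return x
--
-- def find_lower_bound(record_dist, time):
--     """
--     Closed form: least button time b with b*(time-b) > record_dist, via the
--     quadratic formula and an integer square root; time+1 when no press beats
--     the record.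
--     """
--     half = time // 2
--     if record_dist >= (time - half) * half:
--         return time + 1
--     disc = time * time - 4 * record_dist
--     s = _isqrt(disc)
--     if s * s == disc:
--         s -= 1
--     c = (time - s + 1) // 2
--     return c if c > 0 else 0
-- ===== Notes on version B (the rewrite author's own statement) =====
-- stated objective: alternative
-- what changed: Replaces the binary search over button times by a closed-form solution of the quadratic b*(time-b) > record via a Newton integer square root, with an explicit no-solution check against the peak distance.
-- intended difference: When record_dist exactly equals the best achievable distance (time-time//2)*(time//2) and time>=1, A returns time//2+1 (a press that only TIES the record), while B returns its no-solution value time+1, which is the intended answer since no press beats the record. — e.g. on find_lower_bound(12, 7): A returns 4, B returns 8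
import Mathlib
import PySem

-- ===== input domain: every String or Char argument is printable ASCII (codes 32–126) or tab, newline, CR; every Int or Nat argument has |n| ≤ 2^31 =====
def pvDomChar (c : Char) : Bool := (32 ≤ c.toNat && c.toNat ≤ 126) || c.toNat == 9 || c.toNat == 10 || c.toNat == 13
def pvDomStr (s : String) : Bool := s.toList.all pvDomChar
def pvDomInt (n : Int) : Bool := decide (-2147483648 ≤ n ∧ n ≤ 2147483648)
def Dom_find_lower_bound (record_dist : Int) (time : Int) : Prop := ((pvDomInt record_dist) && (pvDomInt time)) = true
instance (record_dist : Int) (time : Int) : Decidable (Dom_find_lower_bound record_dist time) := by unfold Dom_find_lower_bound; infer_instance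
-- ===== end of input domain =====

-- B replaces A's binary search by a closed-form quadratic solution with a Newton integer
-- square root (objective: alternative). On record_dist = best achievable distance (time ≥ 1)
-- A returns a press that only ties the record; B returns its no-solution value time+1 (see D_).

-- ===== PORT A =====
-- A's while-loop; fuel only makes the recursion structural (chosen ≥ iteration count, proved below)
def findLoop (record_dist time : Int) : Nat → Int → Int → Int
  | 0, _, _ => 0
  | fuel+1, leftIdx, rightIdx =>
    let middleIdx := PySem.Int.floordiv (leftIdx + rightIdx) 2
    let distance := (time - middleIdx) * middleIdx   -- calculate_distance(time, middleIdx)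
    if distance < record_dist then
      if middleIdx + 1 ≤ rightIdx then findLoop record_dist time fuel (middleIdx + 1) rightIdx
      else middleIdx + 1            -- loop exits with leftIdx > rightIdx; distance < record → middleIdx+1
    else if record_dist < distance then
      if leftIdx ≤ middleIdx - 1 then findLoop record_dist time fuel leftIdx (middleIdx - 1)
      else middleIdx                -- loop exits; distance ≥ record → middleIdx
    else middleIdx + 1              -- exact match

def find_lower_bound (record_dist : Int) (time : Int) : Int :=
  -- time < 0: the Python while body never runs and `distance` is unbound (UnboundLocalError);
  -- excluded by Pre_find_lower_bound, the 0 below is arbitrary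
  if 0 ≤ time then findLoop record_dist time (time.toNat + 1) 0 time else 0

-- ===== PORT B =====
-- Newton's method loop of _isqrt; fuel only makes the recursion structural (x strictly decreases)
def isqrtLoop (n : Int) : Nat → Int → Int → Int
  | 0, x, _ => x
  | fuel+1, x, y =>
    if y < x then isqrtLoop n fuel y (PySem.Int.floordiv (y + PySem.Int.floordiv n y) 2) else x

def isqrt (n : Int) : Int :=
  if n < 2 then n else isqrtLoop n n.toNat n (PySem.Int.floordiv (n + 1) 2)

def find_lower_bound_alt (record_dist : Int) (time : Int) : Int :=
  let half := PySem.Int.floordiv time 2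
  if (time - half) * half ≤ record_dist then time + 1
  else
    let disc := time * time - 4 * record_dist
    let s := isqrt disc
    let s' := if s * s = disc then s - 1 else s
    let c := PySem.Int.floordiv (time - s' + 1) 2
    if 0 < c then c else 0

-- ===== PRECONDITION & SPEC =====
-- Pre_ excludes exactly time < 0, where the Python A raises UnboundLocalError
def Pre_find_lower_bound (record_dist : Int) (time : Int) : Prop := 0 ≤ time
instance (record_dist : Int) (time : Int) : Decidable (Pre_find_lower_bound record_dist time) := by
  unfold Pre_find_lower_bound; infer_instance

def pvWitness_find_lower_bound : Int × Int := (3, 5)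

-- When record_dist equals the best achievable distance (time-time//2)*(time//2) and time ≥ 1,
-- A returns time//2+1, a press that only TIES the record; B returns time+1 (its no-solution
-- value), the intended answer since no press strictly beats the record.
def D_find_lower_bound (record_dist : Int) (time : Int) : Prop :=
  1 ≤ time ∧ record_dist = (time - PySem.Int.floordiv time 2) * PySem.Int.floordiv time 2
instance (record_dist : Int) (time : Int) : Decidable (D_find_lower_bound record_dist time) := by
  unfold D_find_lower_bound; infer_instance

def Spec_find_lower_bound (record_dist : Int) (time : Int) (out : Int) : Prop :=
  ¬ D_find_lower_bound record_dist time → out = find_lower_bound_alt record_dist time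
instance (record_dist : Int) (time : Int) (out : Int) : Decidable (Spec_find_lower_bound record_dist time out) := by
  unfold Spec_find_lower_bound; infer_instance

def pvDiffWitness_find_lower_bound : Int × Int := (12, 7)
def pvDiffWitnessOut_find_lower_bound : Int × Int := (4, 8)

-- ===== CLAIM (what is proved, stated in full; the proofs are below) =====
def Claim_unchanged_find_lower_bound : Prop := ∀ (record_dist : Int) (time : Int), Dom_find_lower_bound record_dist time → Pre_find_lower_bound record_dist time → Spec_find_lower_bound record_dist time (find_lower_bound record_dist time)
def Claim_changed_find_lower_bound : Prop := Dom_find_lower_bound (pvDiffWitness_find_lower_bound.1) (pvDiffWitness_find_lower_bound.2) ∧ Pre_find_lower_bound (pvDiffWitness_find_lower_bound.1) (pvDiffWitness_find_lower_bound.2) ∧ D_find_lower_bound (pvDiffWitness_find_lower_bound.1) (pvDiffWitness_find_lower_bound.2) ∧ find_lower_bound (pvDiffWitness_find_lower_bound.1) (pvDiffWitness_find_lower_bound.2) = pvDiffWitnessOut_find_lower_bound.1 ∧ find_lower_bound_alt (pvDiffWitness_find_lower_bound.1) (pvDiffWitness_find_lower_bound.2) = pvDiffWitnessOut_find_lower_bound.2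 ∧ pvDiffWitnessOut_find_lower_bound.1 ≠ pvDiffWitnessOut_find_lower_bound.2
def Claim_exact_find_lower_bound : Prop := ∀ (record_dist : Int) (time : Int), Dom_find_lower_bound record_dist time → Pre_find_lower_bound record_dist time → D_find_lower_bound record_dist time → find_lower_bound record_dist time ≠ find_lower_bound_alt record_dist time

-- ===== LEMMAS AND PROOFS =====

-- the distance b*(time-b) is maximal at b = time//2
lemma dist_le_best (time half b : Int) (h1 : 2*half ≤ time) (h2 : time ≤ 2*half + 1) :
    (time - b) * b ≤ (time - half) * half := by
  rcases (by omega : time = 2*half ∨ time = 2*half + 1) with h | h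
  · have key : (time - half)*half - (time - b)*b = (half - b)^2 := by subst h; ring
    nlinarith [sq_nonneg (half - b)]
  · have key : (time - half)*half - (time - b)*b = (half - b)*(half - b + 1) := by subst h; ring
    rcases le_or_gt b half with hb | hb
    · nlinarith [mul_nonneg (by omega : (0:Int) ≤ half - b) (by omega : (0:Int) ≤ half - b + 1)]
    · have hp : 0 ≤ (-(half - b)) * (-(half - b + 1)) :=
        mul_nonneg (by omega) (by omega)
      have he : (-(half - b)) * (-(half - b + 1)) = (half - b)*(half - b + 1) := by ring
      linarith [key, hp, he]

-- the distance is strictly increasing on [0, time//2]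
lemma dist_smono (time half x y : Int) (h1 : 2*half ≤ time)
    (hx : 0 ≤ x) (hxy : x < y) (hy : y ≤ half) :
    (time - x) * x < (time - y) * y := by
  have h3 : 0 < (y - x) * (time - x - y) := mul_pos (by omega) (by omega)
  nlinarith [h3]

lemma fdiv2_bounds (a : Int) :
    2 * PySem.Int.floordiv a 2 ≤ a ∧ a < 2 * PySem.Int.floordiv a 2 + 2 := by
  have h := PySem.Int.floordiv_mul_add_mod a 2
  have h1 := PySem.Int.mod_nonneg a (b := 2) (by omega)
  have h2 := PySem.Int.mod_lt a (b := 2) (by omega)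
  omega

-- A's loop returns rightIdx+1 when every distance is below the record
lemma findLoop_allless (record time : Int) (fuel : Nat) :
    ∀ lo hi : Int, (hi - lo).toNat < fuel → lo ≤ hi →
    (∀ b : Int, (time - b) * b < record) →
    findLoop record time fuel lo hi = hi + 1 := by
  induction fuel with
  | zero => intro lo hi hf _ _; omega
  | succ fuel ih =>
    intro lo hi hf hlh hall
    simp only [findLoop]
    have hmid := PySem.Int.floordiv_two_mid_bounds (lo := lo) (hi := hi) hlh
    rw [if_pos (hall _)]
    by_cases hb : PySem.Int.floordiv (lo + hi) 2 + 1 ≤ hi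
    · rw [if_pos hb, ih _ _ (by omega) (by omega) hall]
    · rw [if_neg hb]; omega

-- A's loop finds a = the least beating press, when the search range is inside the
-- increasing part [0, time//2 - 1] and a is known to lie in [lo, hi+1]
lemma findLoop_correct (record time half a : Int) (h1 : 2*half ≤ time) (h2 : time ≤ 2*half + 1)
    (ha0 : 0 ≤ a) (haB : record < (time - a) * a)
    (haMin : ∀ b : Int, 0 ≤ b → b < a → (time - b) * b ≤ record) (fuel : Nat) :
    ∀ lo hi : Int, (hi - lo).toNat < fuel → lo ≤ hi → 0 ≤ lo → hi ≤ half - 1 →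
    lo ≤ a → a ≤ hi + 1 →
    findLoop record time fuel lo hi = a := by
  induction fuel with
  | zero => intro lo hi hf _ _ _ _ _; omega
  | succ fuel ih =>
    intro lo hi hf hlh hlo hhi hla hah
    simp only [findLoop]
    have hmid := PySem.Int.floordiv_two_mid_bounds (lo := lo) (hi := hi) hlh
    set mid := PySem.Int.floordiv (lo + hi) 2 with hmiddef
    rcases lt_trichotomy ((time - mid) * mid) record with hc | hc | hc
    · -- distance < record: a > mid
      rw [if_pos hc]
      have hma : mid < a := by
        by_contra hh
        push_neg at hh
        rcases eq_or_lt_of_le hh with he | hl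
        · rw [← he] at hc; linarith
        · have := dist_smono time half a mid h1 ha0 hl (by omega)
          linarith
      by_cases hb : mid + 1 ≤ hi
      · rw [if_pos hb]
        exact ih _ _ (by omega) (by omega) (by omega) hhi (by omega) hah
      · rw [if_neg hb]; omega
    · -- exact match: a = mid+1
      rw [if_neg (by linarith), if_neg (by linarith)]
      have hma : mid < a := by
        by_contra hh
        push_neg at hh
        rcases eq_or_lt_of_le hh with he | hl
        · rw [← he] at hc; linarith
        · have := dist_smono time half a mid h1 ha0 hl (by omega)
          linarith
      by_contra hne
      have h4 : mid + 1 < a := by omega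
      have h5 := haMin (mid + 1) (by omega) h4
      have h6 := dist_smono time half mid (mid + 1) h1 (by omega) (by omega) (by omega)
      linarith
    · -- distance > record: a ≤ mid
      rw [if_neg (by linarith), if_pos hc]
      have hma : a ≤ mid := by
        by_contra hh
        push_neg at hh
        have := haMin mid (by omega) hh
        linarith
      by_cases hb : lo ≤ mid - 1
      · rw [if_pos hb]
        exact ih _ _ (by omega) hb hlo (by omega) hla (by omega)
      · rw [if_neg hb]; omega

-- Newton's loop: from any state with n < (x+1)², it lands on the floor square root
lemma isqrtLoop_spec (n : Int) (hn : 2 ≤ n) (fuel : Nat) :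
    ∀ x y : Int, x.toNat ≤ fuel → 1 ≤ x → n < (x + 1) * (x + 1) →
    y = PySem.Int.floordiv (x + PySem.Int.floordiv n x) 2 →
    1 ≤ isqrtLoop n fuel x y ∧
    isqrtLoop n fuel x y * isqrtLoop n fuel x y ≤ n ∧
    n < (isqrtLoop n fuel x y + 1) * (isqrtLoop n fuel x y + 1) := by
  induction fuel with
  | zero => intro x y hf hx _ _; omega
  | succ fuel ih =>
    intro x y hf hx hxub hy
    -- division facts: n = q*x + r with 0 ≤ r < x, and x + q = 2*y + m with 0 ≤ m < 2
    have hq1 := PySem.Int.floordiv_mul_add_mod n x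
    have hq2 := PySem.Int.mod_nonneg n (b := x) (by omega)
    have hq3 := PySem.Int.mod_lt n (b := x) (by omega)
    set q := PySem.Int.floordiv n x with hqdef
    set r := PySem.Int.mod n x with hrdef
    have hq0 : 0 ≤ q := by
      rw [hqdef, PySem.Int.floordiv_eq_ediv_of_pos (by omega)]
      exact Int.ediv_nonneg (by omega) (by omega)
    have hy1 := PySem.Int.floordiv_mul_add_mod (x + q) 2
    have hy2 := PySem.Int.mod_nonneg (x + q) (b := 2) (by omega)
    have hy3 := PySem.Int.mod_lt (x + q) (b := 2) (by omega)
    have hyb : 2*y ≤ x + q ∧ x + q < 2*y + 2 := by rw [hy]; omega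
    -- the Newton step never undershoots: n < (y+1)²
    have hkey : n < (y + 1) * (y + 1) := by
      have e1 : (x + q + 1)*(x + q + 1) - 4*(q*x + r + 1) = (x - q - 1)*(x - q - 1) + 4*(x - 1 - r) := by ring
      have e2 : (x + q + 1)*(x + q + 1) ≤ (2*y + 2)*(2*y + 2) :=
        mul_self_le_mul_self (by omega) (by omega)
      have e3 : (2*y + 2)*(2*y + 2) = 4*((y + 1)*(y + 1)) := by ring
      have e4 : 0 ≤ (x - q - 1)*(x - q - 1) := mul_self_nonneg _
      linarith
    have hy0 : 0 ≤ y := by omega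
    simp only [isqrtLoop]
    by_cases hlt : y < x
    · rw [if_pos hlt]
      have hy1' : 1 ≤ y := by
        rcases (by omega : 1 ≤ y ∨ y = 0) with h | h
        · exact h
        · exfalso
          -- y = 0 forces x = 1, hence q = n ≥ 2, contradicting x + q < 2
          have hx1 : x = 1 := by omega
          have hxx : q * x = q := by rw [hx1]; ring
          omega
      exact ih y _ (by omega) hy1' hkey rfl
    · rw [if_neg hlt]
      -- exit: y ≥ x, hence q ≥ x and x² ≤ q*x ≤ n
      refine ⟨hx, ?_, hxub⟩
      have hqx : x ≤ q := by omega
      have := mul_le_mul_of_nonneg_right hqx (by omega : (0:Int) ≤ x)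
      linarith

lemma isqrt_spec (n : Int) (hn : 0 ≤ n) :
    0 ≤ isqrt n ∧ isqrt n * isqrt n ≤ n ∧ n < (isqrt n + 1) * (isqrt n + 1) := by
  unfold isqrt
  by_cases h : n < 2
  · rw [if_pos h]
    rcases (by omega : n = 0 ∨ n = 1) with h' | h' <;> subst h' <;> norm_num
  · rw [if_neg h]
    have hdn : PySem.Int.floordiv n n = 1 := by
      rw [PySem.Int.floordiv_eq_iff_of_pos (by omega)]
      constructor <;> nlinarith
    have hini : PySem.Int.floordiv (n + 1) 2 = PySem.Int.floordiv (n + PySem.Int.floordiv n n) 2 := by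
      rw [hdn]
    have := isqrtLoop_spec n (by omega) n.toNat n (PySem.Int.floordiv (n + 1) 2)
      (by omega) (by omega) (by nlinarith) hini
    exact ⟨by omega, this.2.1, this.2.2⟩

-- record < best forces the discriminant to be at least 2 (by parity of time)
lemma disc_ge_two (record time half : Int) (h1 : 2*half ≤ time) (h2 : time ≤ 2*half + 1)
    (hlt : record < (time - half) * half) : 2 ≤ time * time - 4 * record := by
  rcases (by omega : time = 2*half ∨ time = 2*half + 1) with h | h
  · have e : time * time - 4 * record = 4*((time - half)*half - record) := by subst h; ring
    linarith
  · have e : time * time - 4 * record = 4*((time - half)*half - record) + 1 := by subst h; ring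
    linarith

-- the closed form: given t with t² < disc ≤ (t+1)², r = max(0, (time-t+1)//2) is the
-- least b ≥ 0 beating the record, and r ≤ time//2
lemma closed_form_char (record time half t c r : Int)
    (h1 : 2*half ≤ time) (h2 : time ≤ 2*half + 1) (ht0 : 0 ≤ time)
    (ht1' : 1 ≤ t)
    (htl : t * t < time * time - 4 * record)
    (htu : time * time - 4 * record ≤ (t + 1) * (t + 1))
    (hc : c = PySem.Int.floordiv (time - t + 1) 2)
    (hr : r = if 0 < c then c else 0) :
    0 ≤ r ∧ r ≤ half ∧ record < (time - r) * r ∧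
    (∀ b : Int, 0 ≤ b → b < r → (time - b) * b ≤ record) := by
  have hcb := fdiv2_bounds (time - t + 1)
  rw [← hc] at hcb
  have hchalf : c ≤ half := by omega
  by_cases hcpos : 0 < c
  · rw [hr, if_pos hcpos]
    refine ⟨by omega, hchalf, ?_, ?_⟩
    · -- record < dist c: (time - 2c)² ≤ t² < disc
      have hp : 0 ≤ (t - (time - 2*c)) * (t + (time - 2*c)) := mul_nonneg (by omega) (by omega)
      have he : (t - (time - 2*c)) * (t + (time - 2*c))
          = t * t - (time - 2*c) * (time - 2*c) := by ring
      have hsq : (time - 2*c) * (time - 2*c) ≤ t * t := by linarith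
      have hid : (time*time - 4*record) - (time - 2*c) * (time - 2*c)
          = 4*((time - c)*c - record) := by ring
      linarith
    · intro b hb0 hbc
      have hsq : (t + 1) * (t + 1) ≤ (time - 2*b) * (time - 2*b) :=
        mul_self_le_mul_self (by omega) (by omega)
      have hid : (time*time - 4*record) - (time - 2*b) * (time - 2*b)
          = 4*((time - b)*b - record) := by ring
      linarith
  · rw [hr, if_neg hcpos]
    refine ⟨le_refl 0, by omega, ?_, ?_⟩
    · -- c ≤ 0 forces t ≥ time, so record < 0 = dist 0
      have htt : time ≤ t := by omega
      have h5 : time * time ≤ t * t := mul_self_le_mul_self ht0 htt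
      have h6 : record < 0 := by linarith
      calc record < 0 := h6
        _ = (time - 0) * 0 := by ring
    · intro b hb0 hbr; omega

-- B's result, when some press beats the record, is the least b ≥ 0 with
-- record < (time-b)*b, and it is at most time//2
lemma alt_char (record time half : Int) (ht : 0 ≤ time)
    (hhalf : half = PySem.Int.floordiv time 2)
    (hhb1 : 2*half ≤ time) (hhb2 : time ≤ 2*half + 1)
    (hlt : record < (time - half) * half) :
    0 ≤ find_lower_bound_alt record time ∧ find_lower_bound_alt record time ≤ half ∧
    record < (time - find_lower_bound_alt record time) * find_lower_bound_alt record time ∧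
    (∀ b : Int, 0 ≤ b → b < find_lower_bound_alt record time → (time - b) * b ≤ record) := by
  have hd2 := disc_ge_two record time half hhb1 hhb2 hlt
  obtain ⟨hs0, hs1, hs2⟩ := isqrt_spec (time * time - 4 * record) (by omega)
  simp only [find_lower_bound_alt]
  rw [← hhalf, if_neg (by linarith)]
  set disc := time * time - 4 * record with hdisc
  set s := isqrt disc with hs
  have hs1' : 1 ≤ s := by
    rcases (by omega : 1 ≤ s ∨ s = 0) with h | h
    · exact h
    · exfalso; rw [h] at hs2; norm_num at hs2; omega
  by_cases hsq : s * s = disc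
  · rw [if_pos hsq]
    have hs2' : 2 ≤ s := by
      rcases (by omega : 2 ≤ s ∨ s = 1) with h | h
      · exact h
      · exfalso; rw [h] at hsq; norm_num at hsq; omega
    refine closed_form_char record time half (s - 1) _ _ hhb1 hhb2 ht (by omega) ?_ ?_ rfl rfl
    · have : (s - 1) * (s - 1) < s * s := by nlinarith
      omega
    · have : (s - 1 + 1) * (s - 1 + 1) = s * s := by ring
      omega
  · rw [if_neg hsq]
    exact closed_form_char record time half s _ _ hhb1 hhb2 ht hs1' (by omega) (by omega) rfl rfl

-- ===== VERDICT (by name: the statement is the Claim_ definition above) =====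
theorem find_lower_bound_spec : Claim_unchanged_find_lower_bound := by
  intro record time _ hpre hnd
  have ht : 0 ≤ time := hpre
  have hhb := fdiv2_bounds time
  unfold find_lower_bound
  rw [if_pos ht]
  rcases lt_trichotomy record ((time - PySem.Int.floordiv time 2) * PySem.Int.floordiv time 2)
    with hc | hc | hc
  · -- some press beats the record: both sides are the least beating press
    obtain ⟨hr0, hrh, hrB, hrMin⟩ :=
      alt_char record time (PySem.Int.floordiv time 2) ht rfl (by omega) (by omega) hc
    -- unfold A's first iteration: mid = time//2, distance = best > record → go left
    have hmid0 : PySem.Int.floordiv (0 + time) 2 = PySem.Int.floordiv time 2 := by rw [zero_add]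
    rcases Nat.exists_eq_succ_of_ne_zero (n := time.toNat + 1) (by omega) with ⟨f, hf⟩
    rw [hf]
    simp only [findLoop, hmid0]
    rw [if_neg (by linarith), if_pos hc]
    by_cases hb : (0:Int) ≤ PySem.Int.floordiv time 2 - 1
    · rw [if_pos hb]
      exact findLoop_correct record time (PySem.Int.floordiv time 2)
        (find_lower_bound_alt record time) (by omega) (by omega) hr0 hrB hrMin
        f 0 (PySem.Int.floordiv time 2 - 1) (by omega) (by omega)
        (by omega) (by omega) (by omega) (by omega)
    · rw [if_neg hb]
      -- time//2 = 0: B's result lies in [0, time//2] = {0}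
      omega
  · -- record = best: outside D_ this forces time = 0; both return 1
    by_cases htpos : 1 ≤ time
    · exact absurd ⟨htpos, hc⟩ hnd
    · have ht0 : time = 0 := by omega
      subst ht0
      have hr0 : record = 0 := by simpa using hc
      subst hr0
      decide
  · -- record > best: no press beats the record, both return time+1
    have hall : ∀ b : Int, (time - b) * b < record := by
      intro b
      have := dist_le_best time (PySem.Int.floordiv time 2) b (by omega) (by omega)
      linarith
    rw [findLoop_allless record time (time.toNat + 1) 0 time (by omega) ht hall]
    simp only [find_lower_bound_alt]
    rw [if_pos (by linarith)]

theorem find_lower_bound_changed : Claim_changed_find_lower_bound := by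
  unfold Claim_changed_find_lower_bound; decide

theorem find_lower_bound_tight : Claim_exact_find_lower_bound := by
  intro record time _ hpre hd
  obtain ⟨ht1, hrec⟩ := hd
  have hhb := fdiv2_bounds time
  -- A returns time//2 + 1 (exact match at the first probe); B returns time+1
  unfold find_lower_bound
  rw [if_pos (by omega : (0:Int) ≤ time)]
  have hmid0 : PySem.Int.floordiv (0 + time) 2 = PySem.Int.floordiv time 2 := by rw [zero_add]
  rcases Nat.exists_eq_succ_of_ne_zero (n := time.toNat + 1) (by omega) with ⟨f, hf⟩
  rw [hf]
  simp only [findLoop, hmid0]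
  rw [if_neg (by linarith), if_neg (by linarith)]
  simp only [find_lower_bound_alt]
  rw [if_pos (by linarith)]
  omega
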